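-- pv_equiv track=rewrite | github.com/elvisotieno/dynamicprogramming | datastructures/queue/grocerystore.py | grocery_store
-- ===== SOURCE A (Python) =====
-- def grocery_store(A):
--     n = len(A)
--     size, result = 0, 0
--     for i in range(n):
--         if A[i]==0:
--             size += 1
--         else:
--             size -= 1
--             result = max(result,size)
--     return result
-- ===== SOURCE B (Python) =====
-- def grocery_store(A):
--     # Divide and conquer: for a segment, compute (delta_sum, best) where best is the
--     # maximum running sum reached at a nonzero element within the segment (None if no
--     # nonzero element); segments combine by shifting the right half's best by the
--     # left half's total delta.
--     def solve(lo, hi):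
--         if hi - lo == 1:
--             return (1, None) if A[lo] == 0 else (-1, -1)
--         mid = (lo + hi) // 2
--         sl, bl = solve(lo, mid)
--         sr, br = solve(mid, hi)
--         best = bl
--         if br is not None:
--             sb = sl + br
--             if best is None or sb > best:
--                 best = sb
--         return (sl + sr, best)
--     if not A:
--         return 0
--     b = solve(0, len(A))[1]
--     return b if b is not None and b > 0 else 0
-- ===== Notes on version B (the rewrite author's own statement) =====
-- stated objective: alternative
-- what changed: Replaces the left-to-right counter/max scan by a divide-and-conquer over index halves, each segment returning a (delta-sum, best-at-nonzero) summary combined by shifting the right half's best by the left half's delta-sum.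
import Mathlib
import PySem

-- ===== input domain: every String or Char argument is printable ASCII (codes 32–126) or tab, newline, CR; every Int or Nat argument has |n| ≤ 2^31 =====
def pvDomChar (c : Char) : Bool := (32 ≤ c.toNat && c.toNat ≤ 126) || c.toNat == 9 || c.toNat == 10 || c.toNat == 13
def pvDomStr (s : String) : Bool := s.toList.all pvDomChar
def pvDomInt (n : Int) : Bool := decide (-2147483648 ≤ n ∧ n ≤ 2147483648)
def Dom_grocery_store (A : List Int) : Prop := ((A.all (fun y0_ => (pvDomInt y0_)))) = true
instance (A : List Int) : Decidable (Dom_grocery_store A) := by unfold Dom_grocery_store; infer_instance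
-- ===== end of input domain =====

-- B replaces A's single counter/max scan by a divide-and-conquer with per-segment
-- (delta-sum, best) summaries (objective: alternative; same O(n) cost).

-- ===== PORT A =====
-- Port of A: single loop over the list keeping (size, result); result updated only on nonzero elements.
def grocery_store (A : List Int) : Int :=
  (A.foldl (fun (st : Int × Int) x =>
      if x = 0 then (st.1 + 1, st.2)
      else (st.1 - 1, max st.2 (st.1 - 1))) (0, 0)).2

-- ===== PORT B =====
-- Port of B's solve(lo, hi): the segment A[lo:hi] is represented by the sublist itself;
-- mid = (lo+hi)//2 splits it at half its length.
def gsSolve : List Int → Int × Option Int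
  | [] => (0, none)
  | [x] => if x = 0 then (1, none) else (-1, some (-1))
  | x :: y :: rest =>
    let l := x :: y :: rest
    let m := l.length / 2
    let left := gsSolve (l.take m)
    let right := gsSolve (l.drop m)
    let best :=
      match right.2 with
      | none => left.2
      | some br =>
        let sb := left.1 + br
        match left.2 with
        | none => some sb
        | some b => if sb > b then some sb else some b
    (left.1 + right.1, best)
termination_by l => l.length
decreasing_by
  · simp [List.length_take]; omega
  · simp; omega

def grocery_store_alt (A : List Int) : Int :=
  match A with
  | [] => 0
  | _ =>
    match (gsSolve A).2 with
    | none => 0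
    | some b => if b > 0 then b else 0

-- ===== PRECONDITION & SPEC =====
def Spec_grocery_store (A : List Int) (out : Int) : Prop := out = grocery_store_alt A
instance (A : List Int) (out : Int) : Decidable (Spec_grocery_store A out) := by unfold Spec_grocery_store; infer_instance

-- ===== CLAIM (what is proved, stated in full; the proofs are below) =====
def Claim_equal_grocery_store : Prop := ∀ (A : List Int), Dom_grocery_store A → Spec_grocery_store A (grocery_store A)

-- ===== LEMMAS AND PROOFS =====

-- Spec-side summary: S = total delta of a segment, Bo = max running sum at nonzero positions.
def gsDelta (x : Int) : Int := if x = 0 then 1 else -1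

def gsS (l : List Int) : Int := (l.map gsDelta).sum

def gsOmax : Option Int → Option Int → Option Int
  | none, v => v
  | some b, none => some b
  | some b, some c => some (max b c)

def gsBo : List Int → Option Int
  | [] => none
  | x :: xs => gsOmax (if x = 0 then none else some (-1)) ((gsBo xs).map (fun b => gsDelta x + b))

lemma gsOmax_assoc (u v w : Option Int) : gsOmax (gsOmax u v) w = gsOmax u (gsOmax v w) := by
  cases u <;> cases v <;> cases w <;> simp [gsOmax, max_assoc]

lemma gsOmax_map (a : Int) (u v : Option Int) :
    (gsOmax u v).map (fun b => a + b) = gsOmax (u.map (fun b => a + b)) (v.map (fun b => a + b)) := by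
  cases u <;> cases v <;> simp [gsOmax]

lemma gsS_append (X Y : List Int) : gsS (X ++ Y) = gsS X + gsS Y := by
  simp [gsS]

lemma gsBo_append (X Y : List Int) :
    gsBo (X ++ Y) = gsOmax (gsBo X) ((gsBo Y).map (fun b => gsS X + b)) := by
  induction X with
  | nil => cases h : gsBo Y <;> simp [gsBo, gsS, gsOmax, h]
  | cons x xs ih =>
    have hmap : Option.map ((fun b => gsDelta x + b) ∘ fun b => gsS xs + b) (gsBo Y)
        = Option.map (fun b => gsS (x :: xs) + b) (gsBo Y) := by
      cases gsBo Y <;> simp [gsS, gsDelta]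
    simp only [List.cons_append, gsBo, ih, gsOmax_map, Option.map_map, gsOmax_assoc, hmap]

-- gsSolve computes exactly the spec summary.
lemma gsSolve_eq (l : List Int) : gsSolve l = (gsS l, gsBo l) := by
  induction l using gsSolve.induct with
  | case1 => simp [gsSolve, gsS, gsBo]
  | case2 => simp [gsSolve, gsS, gsBo, gsDelta, gsOmax]
  | case3 x hx => simp [gsSolve, gsS, gsBo, gsDelta, gsOmax, hx]
  | case4 x y rest l m ihl ihr =>
    simp only [show l = x :: y :: rest from rfl,
      show m = (x :: y :: rest).length / 2 from rfl] at ihl ihr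
    rw [gsSolve, ihl, ihr]
    have hsplit : (x :: y :: rest) = (x :: y :: rest).take ((x :: y :: rest).length / 2)
        ++ (x :: y :: rest).drop ((x :: y :: rest).length / 2) := by simp
    simp only [Prod.mk.injEq]
    refine ⟨?_, ?_⟩
    · conv_rhs => rw [hsplit, gsS_append]
    · conv_rhs => rw [hsplit, gsBo_append]
      cases hr : gsBo ((x :: y :: rest).drop ((x :: y :: rest).length / 2)) with
      | none => cases gsBo ((x :: y :: rest).take ((x :: y :: rest).length / 2)) <;> simp [gsOmax]
      | some br =>
        cases gsBo ((x :: y :: rest).take ((x :: y :: rest).length / 2)) with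
        | none => simp [gsOmax]
        | some b =>
          simp only [gsOmax, Option.map_some]
          rw [max_def]
          split_ifs <;> simp only [Option.some.injEq] <;> omega

-- A's fold, characterized in terms of (gsS, gsBo).
lemma grocery_foldl (l : List Int) (s r : Int) :
    l.foldl (fun (st : Int × Int) x =>
      if x = 0 then (st.1 + 1, st.2)
      else (st.1 - 1, max st.2 (st.1 - 1))) (s, r)
    = (s + gsS l, match gsBo l with | none => r | some b => max r (s + b)) := by
  induction l generalizing s r with
  | nil => simp [gsS, gsBo]
  | cons x xs ih =>
    by_cases hx : x = 0
    · rw [List.foldl_cons, if_pos hx, ih]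
      cases h : gsBo xs with
      | none =>
        simp [gsBo, gsS, gsDelta, gsOmax, hx, h]
        ring
      | some b =>
        simp [gsBo, gsS, gsDelta, gsOmax, hx, h, Prod.ext_iff]
        constructor
        · ring
        · congr 1; ring
    · rw [List.foldl_cons, if_neg hx, ih]
      cases h : gsBo xs with
      | none =>
        simp [gsBo, gsS, gsDelta, gsOmax, hx, h, Prod.ext_iff, sub_eq_add_neg]
        ring
      | some b =>
        simp [gsBo, gsS, gsDelta, gsOmax, hx, h, Prod.ext_iff, sub_eq_add_neg]
        constructor
        · ring
        · congr 1
          rw [max_def, max_def]; split_ifs <;> omega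

-- ===== VERDICT (by name: the statement is the Claim_ definition above) =====
theorem grocery_store_spec : Claim_equal_grocery_store := by
  intro A _
  unfold Spec_grocery_store grocery_store grocery_store_alt
  rw [grocery_foldl, gsSolve_eq]
  cases A with
  | nil => simp [gsBo]
  | cons x xs =>
    cases h : gsBo (x :: xs) with
    | none => simp
    | some b =>
      simp only []
      rw [max_def]
      split_ifs <;> omega
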